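-- pv_equiv track=rewrite | github.com/Scarabaeus1031/NEXAH | ENGINE/nexah_kernel/research/experiments/structured_oscillator_networks/defect_worldline_tracker.py | track_worldlines
-- ===== SOURCE A (Python) =====
-- def ring_distance(a, b, N):
--
--     d = abs(a - b)
--     return min(d, N - d)
--
-- def track_worldlines(defect_positions, N, max_jump=2):
--
--     """
--     Greedy nearest-neighbor worldline tracker.
--     Each worldline is a list of (time, ring_index).
--     """
--     worldlines = []
--     active = []
--
--     for t, defects in enumerate(defect_positions):
--
--         defects = list(defects)
--         used = set()
--         new_active = []
--
--         # try to extend existing lines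
--         for line in active:
--
--             last_t, last_pos = line[-1]
--
--             best_idx = None
--             best_dist = None
--
--             for j, pos in enumerate(defects):
--                 if j in used:
--                     continue
--
--                 dist = ring_distance(last_pos, pos, N)
--
--                 if dist <= max_jump:
--                     if best_dist is None or dist < best_dist:
--                         best_dist = dist
--                         best_idx = j
--
--             if best_idx is not None:
--                 pos = defects[best_idx]
--                 line.append((t, pos))
--                 used.add(best_idx)
--                 new_active.append(line)
--             else:
--                 worldlines.append(line)
--
--         # start new lines for unmatched defects
--         for j, pos in enumerate(defects):
--             if j not in used:
--                 new_active.append([(t, pos)])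
--
--         active = new_active
--
--     # finalize remaining active lines
--     worldlines.extend(active)
--
--     return worldlines
-- ===== SOURCE B (Python) =====
-- def track_worldlines(defect_positions, N, max_jump=2):
--     """
--     Greedy nearest-neighbor worldline tracker.
--     Each worldline is a list of (time, ring_index).
--
--     Re-implementation: instead of a 'used' index set and a best-tracking scan
--     over all defects per line, keep the still-available defect positions in a
--     shrinking list; per line compute the distance list once, take the minimum
--     qualifying distance, and pop its first occurrence.
--     """
--     finished = []
--     active = []
--     for t, row in enumerate(defect_positions):
--         avail = list(row)
--         kept = []
--         for line in active:
--             p = line[-1][1]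
--             ds = [min(abs(p - q), N - abs(p - q)) for q in avail]
--             qual = [d for d in ds if d <= max_jump]
--             if qual:
--                 m = min(qual)
--                 pos = avail.pop(ds.index(m))
--                 line.append((t, pos))
--                 kept.append(line)
--             else:
--                 finished.append(line)
--         kept.extend([(t, q)] for q in avail)
--         active = kept
--     return finished + active
-- ===== Notes on version B (the rewrite author's own statement) =====
-- stated objective: alternative
-- what changed: A tracks a 'used' index set and re-scans all defects per line with a branchy best-so-far accumulator; B instead keeps a shrinking list of still-available positions, computes the distance list once per line, takes the min of its qualifying part and pops its first occurrence, so the used-set and the skip branch disappear.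
import Mathlib
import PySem

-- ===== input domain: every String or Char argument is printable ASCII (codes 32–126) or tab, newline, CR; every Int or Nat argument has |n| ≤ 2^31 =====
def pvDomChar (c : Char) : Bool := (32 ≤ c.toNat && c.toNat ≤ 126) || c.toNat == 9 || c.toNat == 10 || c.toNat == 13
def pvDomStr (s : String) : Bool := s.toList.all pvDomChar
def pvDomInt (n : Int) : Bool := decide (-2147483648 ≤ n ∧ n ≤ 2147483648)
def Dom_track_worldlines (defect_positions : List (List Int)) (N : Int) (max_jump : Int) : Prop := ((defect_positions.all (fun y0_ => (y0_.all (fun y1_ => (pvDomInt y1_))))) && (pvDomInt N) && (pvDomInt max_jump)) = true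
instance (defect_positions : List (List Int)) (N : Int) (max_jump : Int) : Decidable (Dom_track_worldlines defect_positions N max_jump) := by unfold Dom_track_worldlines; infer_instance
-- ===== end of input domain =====

-- B is an alternative exact re-implementation: the 'used' index set and per-line best-tracking
-- scan of A are replaced by a shrinking list of available positions, a distance list computed
-- once per line, min of its qualifying part, and a pop of the first occurrence.

-- ===== PORT A =====
def ring_distance (a b N : Int) : Int :=
  let d := |a - b|
  min d (N - d)

-- inner 'for j, pos in enumerate(defects)' body (best-candidate update, skip handled at the fold)
def bestUpd (last_pos N max_jump : Int) (b : Option Int × Option Int) (jp : Int × Int) :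
    Option Int × Option Int :=
  let dist := ring_distance last_pos jp.2 N
  if dist ≤ max_jump then
    match b.2 with
    | none => (some jp.1, some dist)
    | some bd => if dist < bd then (some jp.1, some dist) else b
  else b

-- the inner scan: '(best_idx, best_dist)' after the loop over enumerate(defects)
def bestOf (last_pos N max_jump : Int) (used : PySem.Set Int) (l : List (Int × Int)) :
    Option Int × Option Int :=
  l.foldl (fun b jp => if PySem.Set.contains used jp.1 then b else bestUpd last_pos N max_jump b jp)
    (none, none)

-- body of 'for line in active' ; state = (worldlines, new_active, used)
def stepA (t N max_jump : Int) (defects : List Int)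
    (s : List (List (Int × Int)) × List (List (Int × Int)) × PySem.Set Int)
    (line : List (Int × Int)) :
    List (List (Int × Int)) × List (List (Int × Int)) × PySem.Set Int :=
  let last_pos := (line.getLast?.getD (0, 0)).2
  let best := bestOf last_pos N max_jump s.2.2 (PySem.List.enumerate defects 0)
  match best.1 with
  | some j =>
      let pos := (PySem.List.pyGet? defects j).getD 0   -- defects[j]; j is always in range
      (s.1, s.2.1 ++ [line ++ [(t, pos)]], PySem.Set.add s.2.2 j)
  | none => (s.1 ++ [line], s.2.1, s.2.2)

-- body of 'for t, defects in enumerate(defect_positions)' ; state = (worldlines, active)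
def timestepA (N max_jump : Int)
    (st : List (List (Int × Int)) × List (List (Int × Int))) (td : Int × List Int) :
    List (List (Int × Int)) × List (List (Int × Int)) :=
  let t := td.1
  let defects := td.2
  let r := st.2.foldl (stepA t N max_jump defects) (st.1, [], PySem.Set.empty)
  -- start new lines for unmatched defects
  let new_active := (PySem.List.enumerate defects 0).foldl
      (fun acc jp => if PySem.Set.contains r.2.2 jp.1 then acc else acc ++ [[(t, jp.2)]]) r.2.1
  (r.1, new_active)

def track_worldlines (defect_positions : List (List Int)) (N : Int) (max_jump : Int) :
    List (List (Int × Int)) :=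
  let fin := (PySem.List.enumerate defect_positions 0).foldl (timestepA N max_jump) ([], [])
  fin.1 ++ fin.2

-- ===== PORT B =====
-- body of 'for line in active' ; state = (finished, kept, avail)
def stepB (t N max_jump : Int)
    (s : List (List (Int × Int)) × List (List (Int × Int)) × List Int)
    (line : List (Int × Int)) :
    List (List (Int × Int)) × List (List (Int × Int)) × List Int :=
  let p := (line.getLast?.getD (0, 0)).2
  let ds := s.2.2.map (fun q => let d := |p - q|; min d (N - d))
  let qual := ds.filter (fun d => d ≤ max_jump)
  match PySem.List.min? qual (fun d => d) with
  | some m =>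
      -- avail.pop(ds.index(m)) ; m occurs in ds, so index? is some and the pop succeeds
      match PySem.List.pop? s.2.2 (((PySem.List.index? ds m).getD 0 : Nat) : Int) with
      | some (pos, rest) => (s.1, s.2.1 ++ [line ++ [(t, pos)]], rest)
      | none => (s.1, s.2.1, s.2.2)   -- unreachable
  | none => (s.1 ++ [line], s.2.1, s.2.2)

-- body of 'for t, row in enumerate(defect_positions)' ; state = (finished, active)
def timestepB (N max_jump : Int)
    (st : List (List (Int × Int)) × List (List (Int × Int))) (td : Int × List Int) :
    List (List (Int × Int)) × List (List (Int × Int)) :=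
  let t := td.1
  let row := td.2
  let r := st.2.foldl (stepB t N max_jump) (st.1, [], row)
  (r.1, r.2.1 ++ r.2.2.map (fun q => [(t, q)]))

def track_worldlines_alt (defect_positions : List (List Int)) (N : Int) (max_jump : Int) :
    List (List (Int × Int)) :=
  let fin := (PySem.List.enumerate defect_positions 0).foldl (timestepB N max_jump) ([], [])
  fin.1 ++ fin.2

-- ===== PRECONDITION & SPEC =====
def Spec_track_worldlines (defect_positions : List (List Int)) (N : Int) (max_jump : Int) (out : List (List (Int × Int))) : Prop := out = track_worldlines_alt defect_positions N max_jump
instance (defect_positions : List (List Int)) (N : Int) (max_jump : Int) (out : List (List (Int × Int))) : Decidable (Spec_track_worldlines defect_positions N max_jump out) := by unfold Spec_track_worldlines; infer_instance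

-- ===== CLAIM (what is proved, stated in full; the proofs are below) =====
def Claim_equal_track_worldlines : Prop := ∀ (defect_positions : List (List Int)) (N : Int) (max_jump : Int), Dom_track_worldlines defect_positions N max_jump → Spec_track_worldlines defect_positions N max_jump (track_worldlines defect_positions N max_jump)

-- ===== LEMMAS AND PROOFS =====

-- reference matcher: first available defect at minimal qualifying ring distance,
-- together with the remaining available list after removing it
def pick (p N mj : Int) : List (Int × Int) → Option ((Int × Int) × List (Int × Int))
  | [] => none
  | (j, q) :: l =>
    let d := ring_distance p q N
    match pick p N mj l with
    | none => if d ≤ mj then some ((j, q), l) else none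
    | some (e, rest) =>
        if d ≤ mj ∧ d ≤ ring_distance p e.2 N then some ((j, q), l)
        else some (e, (j, q) :: rest)

-- a fold that skips elements satisfying p is a fold over the filtered list
theorem foldl_skip {α β : Type} (p : α → Bool) (f : β → α → β) (l : List α) (init : β) :
    l.foldl (fun b x => if p x then b else f b x) init
      = (l.filter (fun x => !p x)).foldl f init := by
  induction l generalizing init with
  | nil => rfl
  | cons x t ih => by_cases h : p x <;> simp [h, ih]

theorem foldl_skip_append {α β : Type} (p : α → Bool) (f : α → β) (l : List α) (acc : List β) :
    l.foldl (fun acc x => if p x then acc else acc ++ [f x]) acc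
      = acc ++ (l.filter (fun x => !p x)).map f := by
  induction l generalizing acc with
  | nil => simp
  | cons x t ih => by_cases h : p x <;> simp [h, ih]

theorem bestUpd_some (p N mj : Int) (l : List (Int × Int)) (j0 d0 : Int) :
    l.foldl (bestUpd p N mj) (some j0, some d0)
      = match pick p N mj l with
        | none => (some j0, some d0)
        | some (e, _) =>
            if ring_distance p e.2 N < d0 then (some e.1, some (ring_distance p e.2 N))
            else (some j0, some d0) := by
  induction l generalizing j0 d0 with
  | nil => simp [pick]
  | cons x t ih =>
    obtain ⟨j, q⟩ := x
    simp only [List.foldl_cons]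
    have hb : bestUpd p N mj (some j0, some d0) (j, q)
        = if ring_distance p q N ≤ mj then
            (if ring_distance p q N < d0 then (some j, some (ring_distance p q N))
             else (some j0, some d0))
          else (some j0, some d0) := rfl
    rw [hb]
    simp only [pick]
    cases hp : pick p N mj t with
    | none =>
      simp only [hp]
      split_ifs with h1 h2 <;> rw [ih] <;> simp only [hp]
      · rw [if_pos h2]
      · rw [if_neg h2]
    | some r =>
      obtain ⟨e, rest⟩ := r
      simp only [hp]
      by_cases h1 : ring_distance p q N ≤ mj
      · by_cases h2 : ring_distance p q N < d0
        · rw [if_pos h1, if_pos h2, ih]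
          simp only [hp]
          by_cases h3 : ring_distance p q N ≤ ring_distance p e.2 N
          · simp only [if_pos (And.intro h1 h3)]
            rw [if_neg (show ¬ ring_distance p e.2 N < ring_distance p q N by omega),
              if_pos h2]
          · simp only [if_neg (show ¬ (ring_distance p q N ≤ mj ∧ ring_distance p q N ≤ ring_distance p e.2 N) from fun hc => h3 hc.2)]
            rw [if_pos (show ring_distance p e.2 N < ring_distance p q N by omega),
              if_pos (show ring_distance p e.2 N < d0 by omega)]
        · rw [if_pos h1, if_neg h2, ih]
          simp only [hp]
          by_cases h3 : ring_distance p q N ≤ ring_distance p e.2 N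
          · simp only [if_pos (And.intro h1 h3)]
            rw [if_neg (show ¬ ring_distance p e.2 N < d0 by omega), if_neg h2]
          · simp only [if_neg (show ¬ (ring_distance p q N ≤ mj ∧ ring_distance p q N ≤ ring_distance p e.2 N) from fun hc => h3 hc.2)]
      · rw [if_neg h1, ih]
        simp only [hp]
        simp only [if_neg (show ¬ (ring_distance p q N ≤ mj ∧ ring_distance p q N ≤ ring_distance p e.2 N) from fun hc => h1 hc.1)]

theorem bestUpd_none (p N mj : Int) (l : List (Int × Int)) :
    l.foldl (bestUpd p N mj) (none, none)
      = match pick p N mj l with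
        | none => ((none : Option Int), (none : Option Int))
        | some (e, _) => (some e.1, some (ring_distance p e.2 N)) := by
  induction l with
  | nil => simp [pick]
  | cons x t ih =>
    obtain ⟨j, q⟩ := x
    simp only [List.foldl_cons]
    have hb : bestUpd p N mj (none, none) (j, q)
        = if ring_distance p q N ≤ mj then (some j, some (ring_distance p q N))
          else (none, none) := rfl
    rw [hb]
    simp only [pick]
    cases hp : pick p N mj t with
    | none =>
      by_cases h1 : ring_distance p q N ≤ mj
      · rw [if_pos h1, if_pos h1, bestUpd_some]
        simp only [hp]
      · rw [if_neg h1, if_neg h1, ih]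
        simp only [hp]
    | some r =>
      obtain ⟨e, rest⟩ := r
      by_cases h1 : ring_distance p q N ≤ mj
      · rw [if_pos h1, bestUpd_some]
        simp only [hp]
        by_cases h3 : ring_distance p q N ≤ ring_distance p e.2 N
        · simp only [if_pos (And.intro h1 h3)]
          rw [if_neg (show ¬ ring_distance p e.2 N < ring_distance p q N by omega)]
        · simp only [if_neg (show ¬ (ring_distance p q N ≤ mj ∧ ring_distance p q N ≤ ring_distance p e.2 N) from fun hc => h3 hc.2)]
          rw [if_pos (show ring_distance p e.2 N < ring_distance p q N by omega)]
      · rw [if_neg h1, ih]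
        simp only [hp]
        simp only [if_neg (show ¬ (ring_distance p q N ≤ mj ∧ ring_distance p q N ≤ ring_distance p e.2 N) from fun hc => h1 hc.1)]

theorem pick_mem (p N mj : Int) (l : List (Int × Int)) (e : Int × Int) (rest : List (Int × Int))
    (h : pick p N mj l = some (e, rest)) : e ∈ l := by
  induction l generalizing e rest with
  | nil => simp [pick] at h
  | cons x t ih =>
    obtain ⟨j, q⟩ := x
    simp only [pick] at h
    cases hp : pick p N mj t with
    | none =>
      simp only [hp] at h
      by_cases h1 : ring_distance p q N ≤ mj
      · rw [if_pos h1, Option.some_inj] at h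
        have h2 : (j, q) = e := congrArg Prod.fst h
        simp [← h2]
      · rw [if_neg h1] at h; exact absurd h (by simp)
    | some r =>
      obtain ⟨e', rest'⟩ := r
      simp only [hp] at h
      by_cases h3 : ring_distance p q N ≤ mj ∧ ring_distance p q N ≤ ring_distance p e'.2 N
      · rw [if_pos h3, Option.some_inj] at h
        have h2 : (j, q) = e := congrArg Prod.fst h
        simp [← h2]
      · rw [if_neg h3, Option.some_inj] at h
        have h2 : e' = e := congrArg Prod.fst h
        exact List.mem_cons_of_mem _ (ih e rest' (h2 ▸ hp))

theorem pick_filter_ne (p N mj : Int) (l : List (Int × Int))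
    (hpw : l.Pairwise (fun a b => a.1 < b.1)) (e : Int × Int) (rest : List (Int × Int))
    (h : pick p N mj l = some (e, rest)) :
    l.filter (fun jp => !(jp.1 == e.1)) = rest := by
  induction l generalizing e rest with
  | nil => simp [pick] at h
  | cons x t ih =>
    obtain ⟨j, q⟩ := x
    obtain ⟨hj, hpw'⟩ := List.pairwise_cons.mp hpw
    have hself : ∀ e' : Int × Int, e' = (j, q) →
        (((j, q) : Int × Int) :: t).filter (fun jp => !(jp.1 == e'.1)) = t := by
      intro e' he'
      subst he'
      simp only [List.filter_cons, BEq.rfl, Bool.not_true, Bool.false_eq_true, if_false]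
      exact List.filter_eq_self.mpr (fun a ha => by simpa using (hj a ha).ne')
    simp only [pick] at h
    cases hp : pick p N mj t with
    | none =>
      simp only [hp] at h
      by_cases h1 : ring_distance p q N ≤ mj
      · rw [if_pos h1, Option.some_inj] at h
        have h2 : (j, q) = e := congrArg Prod.fst h
        have h4 : t = rest := congrArg Prod.snd h
        rw [← h4]; exact hself e (by rw [← h2])
      · rw [if_neg h1] at h; exact absurd h (by simp)
    | some r =>
      obtain ⟨e', rest'⟩ := r
      simp only [hp] at h
      by_cases h3 : ring_distance p q N ≤ mj ∧ ring_distance p q N ≤ ring_distance p e'.2 N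
      · rw [if_pos h3, Option.some_inj] at h
        have h2 : (j, q) = e := congrArg Prod.fst h
        have h4 : t = rest := congrArg Prod.snd h
        rw [← h4]; exact hself e (by rw [← h2])
      · rw [if_neg h3, Option.some_inj] at h
        have h2 : e' = e := congrArg Prod.fst h
        have h4 : (j, q) :: rest' = rest := congrArg Prod.snd h
        have hmem : e ∈ t := pick_mem p N mj t e rest' (h2 ▸ hp)
        have hlt : j < e.1 := hj e hmem
        rw [← h4]
        simp only [List.filter_cons]
        rw [if_pos (show (!(j == e.1)) = true by simpa using hlt.ne)]
        exact congrArg (List.cons (j, q)) (ih hpw' e rest' (h2 ▸ hp))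

-- min over a nonempty list, cons form
theorem foldl_min_char (t : List Int) (x : Int) :
    t.foldl min x = match PySem.List.min? t (fun y => y) with
      | none => x
      | some m => min x m := by
  induction t generalizing x with
  | nil =>
    rw [(PySem.List.min?_eq_none_iff _ _).mpr rfl]
    rfl
  | cons y t ih =>
    rw [List.foldl_cons, ih (min x y), PySem.List.min?_id_cons, ih y]
    cases hm : PySem.List.min? t (fun y => y) <;> simp only [min_assoc]

theorem min?_id_cons' (x : Int) (t : List Int) :
    PySem.List.min? (x :: t) (fun y => y)
      = some (match PySem.List.min? t (fun y => y) with | none => x | some m => min x m) := by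
  rw [PySem.List.min?_id_cons, foldl_min_char]

-- B-side characterization: ds / qual / min? / index? / pop? in terms of pick
theorem pickB_char (p N mj : Int) (l : List (Int × Int)) :
    match pick p N mj l with
    | none => PySem.List.min? ((l.map (fun jp => ring_distance p jp.2 N)).filter (fun d => d ≤ mj)) (fun d => d) = none
    | some (e, rest) =>
        PySem.List.min? ((l.map (fun jp => ring_distance p jp.2 N)).filter (fun d => d ≤ mj)) (fun d => d)
            = some (ring_distance p e.2 N) ∧
        ring_distance p e.2 N ≤ mj ∧
        ∃ i : Nat, PySem.List.index? (l.map (fun jp => ring_distance p jp.2 N)) (ring_distance p e.2 N) = some i ∧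
          (l.map (·.2))[i]? = some e.2 ∧
          (l.map (·.2)).eraseIdx i = rest.map (·.2) := by
  induction l with
  | nil =>
    simp only [pick, List.map_nil, List.filter_nil]
    exact (PySem.List.min?_eq_none_iff _ _).mpr rfl
  | cons x t ih =>
    obtain ⟨j, q⟩ := x
    simp only [pick, List.map_cons, List.filter_cons]
    cases hp : pick p N mj t with
    | none =>
      simp only [hp] at ih ⊢
      by_cases h1 : ring_distance p q N ≤ mj
      · simp only [if_pos h1]
        simp only [h1, decide_true, if_true]
        refine ⟨?_, (by simpa using h1), 0, PySem.List.index?_cons_self .., ?_, ?_⟩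
        · rw [min?_id_cons', ih]
        · simp
        · simp
      · simp only [if_neg h1]
        simp only [h1, decide_false, Bool.false_eq_true, if_false]
        exact ih
    | some r =>
      obtain ⟨e, rest⟩ := r
      simp only [hp] at ih ⊢
      obtain ⟨ihm, ihle, i', ihidx, ihget, iherase⟩ := ih
      by_cases h1 : ring_distance p q N ≤ mj
      · by_cases h3 : ring_distance p q N ≤ ring_distance p e.2 N
        · simp only [if_pos (show ring_distance p q N ≤ mj ∧ ring_distance p q N ≤ ring_distance p e.2 N from ⟨h1, h3⟩)]
          simp only [h1, decide_true, if_true]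
          refine ⟨?_, (by simpa using h1), 0, PySem.List.index?_cons_self .., ?_, ?_⟩
          · rw [min?_id_cons', ihm]
            simp only [min_eq_left h3]
          · simp
          · simp
        · have hlt : ring_distance p e.2 N < ring_distance p q N := by omega
          simp only [if_neg (show ¬ (ring_distance p q N ≤ mj ∧ ring_distance p q N ≤ ring_distance p e.2 N) from fun hc => h3 hc.2)]
          simp only [h1, decide_true, if_true]
          refine ⟨?_, ihle, i' + 1, ?_, ?_, ?_⟩
          · rw [min?_id_cons', ihm]
            simp only [min_eq_right (le_of_lt hlt)]
          · rw [PySem.List.index?_cons_of_ne _ hlt.ne', ihidx]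
            rfl
          · simpa using ihget
          · simp only [List.map_cons, List.eraseIdx_cons_succ, iherase]
      · have hne : ring_distance p q N ≠ ring_distance p e.2 N := by omega
        simp only [if_neg (show ¬ (ring_distance p q N ≤ mj ∧ ring_distance p q N ≤ ring_distance p e.2 N) from fun hc => h1 hc.1)]
        simp only [h1, decide_false, Bool.false_eq_true, if_false]
        refine ⟨ihm, ihle, i' + 1, ?_, ?_, ?_⟩
        · rw [PySem.List.index?_cons_of_ne _ hne, ihidx]
          rfl
        · simpa using ihget
        · simp only [List.map_cons, List.eraseIdx_cons_succ, iherase]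

-- invariant tying A's 'used' to B's 'avail'
def InvTS (defects : List Int) (used : PySem.Set Int) (avail : List Int) : Prop :=
  avail = ((PySem.List.enumerate defects 0).filter
      (fun jp => !(PySem.Set.contains used jp.1))).map (·.2)

theorem contains_add_eq (s : PySem.Set Int) (x y : Int) :
    PySem.Set.contains (PySem.Set.add s x) y = (PySem.Set.contains s y || (y == x)) := by
  apply Bool.eq_iff_iff.mpr
  simp [PySem.Set.mem_add]

theorem mem_filter_enum_pyGet (defects : List Int) (pred : Int × Int → Bool) (e : Int × Int)
    (h : e ∈ (PySem.List.enumerate defects 0).filter pred) :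
    PySem.List.pyGet? defects e.1 = some e.2 := by
  have hmem := List.mem_of_mem_filter h
  rw [PySem.List.mem_enumerate_iff] at hmem
  obtain ⟨k, hk, rfl⟩ := hmem
  simp [hk]

theorem step_corr (t N mj : Int) (defects : List Int)
    (sA : List (List (Int × Int)) × List (List (Int × Int)) × PySem.Set Int)
    (sB : List (List (Int × Int)) × List (List (Int × Int)) × List Int)
    (line : List (Int × Int))
    (h1 : sA.1 = sB.1) (h2 : sA.2.1 = sB.2.1) (hI : InvTS defects sA.2.2 sB.2.2) :
    (stepA t N mj defects sA line).1 = (stepB t N mj sB line).1 ∧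
    (stepA t N mj defects sA line).2.1 = (stepB t N mj sB line).2.1 ∧
    InvTS defects (stepA t N mj defects sA line).2.2 (stepB t N mj sB line).2.2 := by
  unfold InvTS at hI
  simp only [stepA, stepB]
  have hbest : bestOf (line.getLast?.getD (0, 0)).2 N mj sA.2.2 (PySem.List.enumerate defects 0)
      = List.foldl (bestUpd (line.getLast?.getD (0, 0)).2 N mj) (none, none)
          ((PySem.List.enumerate defects 0).filter
            (fun jp => !(PySem.Set.contains sA.2.2 jp.1))) := by
    unfold bestOf
    exact foldl_skip _ _ _ _
  have hds : (((PySem.List.enumerate defects 0).filter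
          (fun jp => !(PySem.Set.contains sA.2.2 jp.1))).map (fun x => x.2)).map
          (fun q => min |(line.getLast?.getD (0, 0)).2 - q| (N - |(line.getLast?.getD (0, 0)).2 - q|))
      = ((PySem.List.enumerate defects 0).filter
          (fun jp => !(PySem.Set.contains sA.2.2 jp.1))).map
          (fun jp => ring_distance (line.getLast?.getD (0, 0)).2 jp.2 N) := by
    rw [List.map_map]
    rfl
  have hA := bestUpd_none (line.getLast?.getD (0, 0)).2 N mj
      ((PySem.List.enumerate defects 0).filter (fun jp => !(PySem.Set.contains sA.2.2 jp.1)))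
  have hB := pickB_char (line.getLast?.getD (0, 0)).2 N mj
      ((PySem.List.enumerate defects 0).filter (fun jp => !(PySem.Set.contains sA.2.2 jp.1)))
  cases hq : pick (line.getLast?.getD (0, 0)).2 N mj
      ((PySem.List.enumerate defects 0).filter (fun jp => !(PySem.Set.contains sA.2.2 jp.1))) with
  | none =>
    simp only [hq] at hA hB
    simp only [hbest, hA, hds, hI, hB]
    exact ⟨by rw [h1], h2, by unfold InvTS; rfl⟩
  | some r =>
    obtain ⟨e, rest⟩ := r
    simp only [hq] at hA hB
    obtain ⟨ihm, ihle, i, ihidx, ihget, iherase⟩ := hB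
    have hpos : PySem.List.pyGet? defects e.1 = some e.2 :=
      mem_filter_enum_pyGet defects _ e (pick_mem _ _ _ _ _ _ hq)
    have hidx' : (PySem.List.index? (((PySem.List.enumerate defects 0).filter
          (fun jp => !(PySem.Set.contains sA.2.2 jp.1))).map
          (fun jp => ring_distance (line.getLast?.getD (0, 0)).2 jp.2 N))
          (ring_distance (line.getLast?.getD (0, 0)).2 e.2 N)).getD 0 = i := by
      rw [ihidx]; rfl
    have hlen : i < (((PySem.List.enumerate defects 0).filter
          (fun jp => !(PySem.Set.contains sA.2.2 jp.1))).map (·.2)).length :=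
      (List.getElem?_eq_some_iff.mp ihget).1
    have hpop : PySem.List.pop? (((PySem.List.enumerate defects 0).filter
          (fun jp => !(PySem.Set.contains sA.2.2 jp.1))).map (·.2)) (i : Int)
        = some (e.2, rest.map (·.2)) := by
      rw [PySem.List.pop?_natCast _ i hlen, (List.getElem?_eq_some_iff.mp ihget).2, iherase]
    simp only [hbest, hA, hds, hI, ihm, hidx', hpop, hpos, Option.getD_some]
    refine ⟨h1, by rw [h2], ?_⟩
    unfold InvTS
    have hfilter : (PySem.List.enumerate defects 0).filter
        (fun jp => !(PySem.Set.contains (PySem.Set.add sA.2.2 e.1) jp.1))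
        = ((PySem.List.enumerate defects 0).filter
            (fun jp => !(PySem.Set.contains sA.2.2 jp.1))).filter
            (fun jp => !(jp.1 == e.1)) := by
      rw [List.filter_filter]
      apply List.filter_congr
      intro a _
      rw [contains_add_eq]
      simp [Bool.not_or, Bool.and_comm]
    rw [hfilter, pick_filter_ne _ _ _ _
      ((PySem.List.pairwise_lt_enumerate defects 0).filter _) e rest hq]

theorem fold_corr (t N mj : Int) (defects : List Int) (active : List (List (Int × Int)))
    (sA : List (List (Int × Int)) × List (List (Int × Int)) × PySem.Set Int)
    (sB : List (List (Int × Int)) × List (List (Int × Int)) × List Int)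
    (h1 : sA.1 = sB.1) (h2 : sA.2.1 = sB.2.1) (hI : InvTS defects sA.2.2 sB.2.2) :
    (active.foldl (stepA t N mj defects) sA).1 = (active.foldl (stepB t N mj) sB).1 ∧
    (active.foldl (stepA t N mj defects) sA).2.1 = (active.foldl (stepB t N mj) sB).2.1 ∧
    InvTS defects (active.foldl (stepA t N mj defects) sA).2.2
        (active.foldl (stepB t N mj) sB).2.2 := by
  induction active generalizing sA sB with
  | nil => exact ⟨h1, h2, hI⟩
  | cons line rest ih =>
    obtain ⟨g1, g2, gI⟩ := step_corr t N mj defects sA sB line h1 h2 hI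
    exact ih _ _ g1 g2 gI

theorem timestep_corr (N mj : Int) (st : List (List (Int × Int)) × List (List (Int × Int)))
    (td : Int × List Int) : timestepA N mj st td = timestepB N mj st td := by
  simp only [timestepA, timestepB]
  have hI0 : InvTS td.2 PySem.Set.empty td.2 := by
    unfold InvTS
    rw [List.filter_eq_self.mpr (fun a _ => by rfl)]
    rw [PySem.List.map_snd_enumerate]
  obtain ⟨g1, g2, gI⟩ := fold_corr td.1 N mj td.2 st.2 (st.1, [], PySem.Set.empty)
      (st.1, [], td.2) rfl rfl hI0
  rw [foldl_skip_append, g1, g2]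
  unfold InvTS at gI
  rw [gI, List.map_map]
  rfl

-- ===== VERDICT (by name: the statement is the Claim_ definition above) =====
theorem track_worldlines_spec : Claim_equal_track_worldlines := by
  intro dp N mj _
  unfold Spec_track_worldlines track_worldlines track_worldlines_alt
  have h : ∀ (l : List (Int × List Int)) (st : List (List (Int × Int)) × List (List (Int × Int))),
      l.foldl (timestepA N mj) st = l.foldl (timestepB N mj) st := by
    intro l
    induction l with
    | nil => intro st; rfl
    | cons x t ih => intro st; simp only [List.foldl_cons, timestep_corr, ih]
  rw [h]
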